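-- pv_equiv track=rewrite | github.com/ericksamera/abi-sauce | src/abi_sauce/ui/alignment_plot.py | merge_gap_spans
-- ===== SOURCE A (Python) =====
-- from typing import Dict, List, Optional, Sequence, Tuple
--
-- def merge_gap_spans(columns: List[Tuple[Optional[int], Optional[int]]]):
--     """Compress consecutive gap columns into spans for shading."""
--     spans, i, n = [], 0, len(columns)
--     while i < n:
--         iA, iB = columns[i]
--         if iA is None or iB is None:
--             which = (
--                 "both" if (iA is None and iB is None) else ("A" if iA is None else "B")
--             )
--             j = i + 1
--             while j < n:
--                 jA, jB = columns[j]
--                 same = (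
--                     (jA is None and jB is None)
--                     if which == "both"
--                     else ((jA is None) if which == "A" else (jB is None))
--                 )
--                 if not same:
--                     break
--                 j += 1
--             spans.append((i, j - 1, which))
--             i = j
--         else:
--             i += 1
--     return spans
-- ===== SOURCE B (Python) =====
-- def merge_gap_spans(columns):
--     """Compress consecutive gap columns into spans for shading.
--
--     Single fold with a running (start, label) state instead of A's nested
--     look-ahead scan: classify each column, extend or flush the open run.
--     """
--     def label(iA, iB):
--         if iA is None and iB is None:
--             return "both"
--         if iA is None:
--             return "A"
--         if iB is None:
--             return "B"
--         return None
--
--     def extends(which, iA, iB):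
--         if which == "both":
--             return iA is None and iB is None
--         if which == "A":
--             return iA is None
--         return iB is None
--
--     spans = []
--     cur = None  # open run: (start index, label)
--     for idx, (iA, iB) in enumerate(columns):
--         if cur is not None:
--             if extends(cur[1], iA, iB):
--                 continue
--             spans.append((cur[0], idx - 1, cur[1]))
--             cur = None
--         w = label(iA, iB)
--         if w is not None:
--             cur = (idx, w)
--     if cur is not None:
--         spans.append((cur[0], len(columns) - 1, cur[1]))
--     return spans
-- ===== Notes on version B (the rewrite author's own statement) =====
-- stated objective: simpler
-- what changed: A's nested look-ahead scan (outer while over i, inner while j advancing past the run) is replaced by a single enumerate-fold carrying an open-run (start, label) state that is extended or flushed per column, with one final flush.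
import Mathlib
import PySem

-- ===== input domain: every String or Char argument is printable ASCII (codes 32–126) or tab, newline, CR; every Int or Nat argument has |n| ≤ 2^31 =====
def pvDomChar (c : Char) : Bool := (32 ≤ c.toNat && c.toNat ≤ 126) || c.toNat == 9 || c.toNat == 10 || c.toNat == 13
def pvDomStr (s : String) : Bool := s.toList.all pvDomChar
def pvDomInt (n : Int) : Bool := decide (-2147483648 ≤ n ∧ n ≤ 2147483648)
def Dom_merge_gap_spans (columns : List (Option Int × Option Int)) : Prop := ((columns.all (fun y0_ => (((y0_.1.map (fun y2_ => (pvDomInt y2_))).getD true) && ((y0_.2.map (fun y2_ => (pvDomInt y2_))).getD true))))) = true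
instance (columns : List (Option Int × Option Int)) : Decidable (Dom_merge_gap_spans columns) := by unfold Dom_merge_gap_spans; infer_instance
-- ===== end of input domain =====

-- B replaces A's nested look-ahead index scan by a single fold over enumerated columns
-- carrying an open-run (start, label) state with a final flush (objective: simpler decomposition).

-- ===== PORT A =====
-- inner `while j < n` scan of A: advance j while column j still matches `which`
def mgsInner (columns : List (Option Int × Option Int)) (which : String) (j : Nat) : Nat :=
  if h : j < columns.length then
    let c := columns[j]
    let same := if which == "both" then c.1.isNone && c.2.isNone
                else if which == "A" then c.1.isNone else c.2.isNone
    if same then mgsInner columns which (j + 1) else j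
  else j
termination_by columns.length - j

-- unfolding lemma and lower bound, cited by mgsOuter's termination proof
theorem mgsInner_eq (columns : List (Option Int × Option Int)) (which : String) (j : Nat) :
    mgsInner columns which j =
      if _h : j < columns.length then
        (if (if which == "both" then columns[j].1.isNone && columns[j].2.isNone
             else if which == "A" then columns[j].1.isNone else columns[j].2.isNone)
         then mgsInner columns which (j + 1) else j)
      else j := by
  conv_lhs => rw [mgsInner]

theorem mgsInner_ge (columns : List (Option Int × Option Int)) (which : String) (j : Nat) :
    j ≤ mgsInner columns which j := by
  rw [mgsInner_eq]
  split_ifs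
  all_goals first
    | exact le_trans (Nat.le_succ j) (mgsInner_ge columns which (j + 1))
    | exact le_refl j
termination_by columns.length - j

-- outer `while i < n` loop of A accumulating `spans`
def mgsOuter (columns : List (Option Int × Option Int)) (i : Nat)
    (spans : List (Int × Int × String)) : List (Int × Int × String) :=
  if h : i < columns.length then
    let c := columns[i]
    if c.1.isNone || c.2.isNone then
      let which := if c.1.isNone && c.2.isNone then "both"
                   else if c.1.isNone then "A" else "B"
      let j := mgsInner columns which (i + 1)
      mgsOuter columns j (spans ++ [((i : Int), (j : Int) - 1, which)])
    else
      mgsOuter columns (i + 1) spans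
  else spans
termination_by columns.length - i
decreasing_by
  · exact Nat.sub_lt_sub_left h (Nat.lt_of_lt_of_le (Nat.lt_succ_self i) (mgsInner_ge _ _ _))
  · omega

def merge_gap_spans (columns : List (Option Int × Option Int)) : List (Int × Int × String) :=
  mgsOuter columns 0 []

-- ===== PORT B =====
def altLabel (iA iB : Option Int) : Option String :=
  if iA.isNone && iB.isNone then some "both"
  else if iA.isNone then some "A"
  else if iB.isNone then some "B"
  else none

def altExtends (which : String) (iA iB : Option Int) : Bool :=
  if which == "both" then iA.isNone && iB.isNone
  else if which == "A" then iA.isNone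
  else iB.isNone

-- loop body of B: extend / flush the open run `st.2`, maybe open a new one
def altStep (st : List (Int × Int × String) × Option (Int × String))
    (p : Int × (Option Int × Option Int)) :
    List (Int × Int × String) × Option (Int × String) :=
  match st.2 with
  | some cur =>
    if altExtends cur.2 p.2.1 p.2.2 then st
    else
      let spans := st.1 ++ [(cur.1, p.1 - 1, cur.2)]
      match altLabel p.2.1 p.2.2 with
      | some w => (spans, some (p.1, w))
      | none => (spans, none)
  | none =>
    match altLabel p.2.1 p.2.2 with
    | some w => (st.1, some (p.1, w))
    | none => (st.1, none)

def merge_gap_spans_alt (columns : List (Option Int × Option Int)) : List (Int × Int × String) :=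
  let st := (PySem.List.enumerate columns 0).foldl altStep ([], none)
  match st.2 with
  | some cur => st.1 ++ [(cur.1, (columns.length : Int) - 1, cur.2)]
  | none => st.1

-- ===== PRECONDITION & SPEC =====
def Spec_merge_gap_spans (columns : List (Option Int × Option Int)) (out : List (Int × Int × String)) : Prop := out = merge_gap_spans_alt columns
instance (columns : List (Option Int × Option Int)) (out : List (Int × Int × String)) : Decidable (Spec_merge_gap_spans columns out) := by unfold Spec_merge_gap_spans; infer_instance

-- ===== CLAIM (what is proved, stated in full; the proofs are below) =====
def Claim_equal_merge_gap_spans : Prop := ∀ (columns : List (Option Int × Option Int)), Dom_merge_gap_spans columns → Spec_merge_gap_spans columns (merge_gap_spans columns)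

-- ===== LEMMAS AND PROOFS =====

theorem mgsInner_le (columns : List (Option Int × Option Int)) (which : String) (j : Nat)
    (hj : j ≤ columns.length) : mgsInner columns which j ≤ columns.length := by
  rw [mgsInner_eq]
  split_ifs
  all_goals first
    | exact mgsInner_le columns which (j + 1) (by omega)
    | exact hj
termination_by columns.length - j

theorem mgsOuter_eq (columns : List (Option Int × Option Int)) (i : Nat)
    (spans : List (Int × Int × String)) :
    mgsOuter columns i spans =
      if _h : i < columns.length then
        (if columns[i].1.isNone || columns[i].2.isNone then
          mgsOuter columns
            (mgsInner columns (if columns[i].1.isNone && columns[i].2.isNone then "both"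
                               else if columns[i].1.isNone then "A" else "B") (i + 1))
            (spans ++ [((i : Int),
              ((mgsInner columns (if columns[i].1.isNone && columns[i].2.isNone then "both"
                                  else if columns[i].1.isNone then "A" else "B") (i + 1) : Nat) : Int) - 1,
              (if columns[i].1.isNone && columns[i].2.isNone then "both"
               else if columns[i].1.isNone then "A" else "B"))])
        else mgsOuter columns (i + 1) spans)
      else spans := by
  conv_lhs => rw [mgsOuter]

-- run B's fold over the suffix of columns starting at index i, then flush
def foldSuf (columns : List (Option Int × Option Int)) (i : Nat)
    (st : List (Int × Int × String) × Option (Int × String)) : List (Int × Int × String) :=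
  let r := (PySem.List.enumerate (columns.drop i) (i : Int)).foldl altStep st
  match r.2 with
  | some cur => r.1 ++ [(cur.1, (columns.length : Int) - 1, cur.2)]
  | none => r.1

theorem foldSuf_inner (columns : List (Option Int × Option Int)) (fuel : Nat) :
    ∀ (j : Nat) (start : Int) (which : String) (spans : List (Int × Int × String)),
    columns.length - j ≤ fuel → j ≤ columns.length →
    foldSuf columns j (spans, some (start, which)) =
      foldSuf columns (mgsInner columns which j)
        (spans ++ [(start, ((mgsInner columns which j : Nat) : Int) - 1, which)], none) := by
  induction fuel with
  | zero =>
    intro j start which spans hf hj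
    have hj' : j = columns.length := by omega
    subst hj'
    rw [mgsInner_eq]
    simp [foldSuf]
  | succ fuel ih =>
    intro j start which spans hf hj
    by_cases h : j < columns.length
    · have hdrop : columns.drop j = columns[j] :: columns.drop (j + 1) :=
        List.drop_eq_getElem_cons h
      rw [mgsInner_eq, dif_pos h]
      by_cases hsame : (if which == "both" then columns[j].1.isNone && columns[j].2.isNone
                else if which == "A" then columns[j].1.isNone else columns[j].2.isNone) = true
      · rw [if_pos hsame]
        have hstep : altStep (spans, some (start, which)) (((j : Nat) : Int), columns[j]) =
            (spans, some (start, which)) := by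
          simp only [altStep]
          rw [if_pos]
          simpa [altExtends] using hsame
        have heq : foldSuf columns j (spans, some (start, which)) =
            foldSuf columns (j + 1) (spans, some (start, which)) := by
          simp only [foldSuf, hdrop, PySem.List.enumerate_cons, List.foldl_cons, hstep]
          norm_num
        rw [heq]
        exact ih (j + 1) start which spans (by omega) (by omega)
      · rw [if_neg hsame]
        have hne : altExtends which columns[j].1 columns[j].2 = false := by
          simp only [Bool.not_eq_true] at hsame
          unfold altExtends
          exact hsame
        have hstates : altStep (spans, some (start, which)) (((j : Nat) : Int), columns[j]) =
            altStep (spans ++ [(start, ((j : Nat) : Int) - 1, which)], none)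
              (((j : Nat) : Int), columns[j]) := by
          simp only [altStep, hne, Bool.false_eq_true, if_false]
        simp only [foldSuf, hdrop, PySem.List.enumerate_cons, List.foldl_cons, hstates]
    · have hj' : j = columns.length := by omega
      subst hj'
      rw [mgsInner_eq]
      simp [foldSuf]

theorem foldSuf_outer (columns : List (Option Int × Option Int)) (fuel : Nat) :
    ∀ (i : Nat) (spans : List (Int × Int × String)),
    columns.length - i ≤ fuel → i ≤ columns.length →
    foldSuf columns i (spans, none) = mgsOuter columns i spans := by
  induction fuel with
  | zero =>
    intro i spans hf hi
    have hi' : i = columns.length := by omega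
    subst hi'
    rw [mgsOuter_eq]
    simp [foldSuf]
  | succ fuel ih =>
    intro i spans hf hi
    by_cases h : i < columns.length
    · have hdrop : columns.drop i = columns[i] :: columns.drop (i + 1) :=
        List.drop_eq_getElem_cons h
      rw [mgsOuter_eq, dif_pos h]
      rcases hci : columns[i] with ⟨a, b⟩
      rw [hci] at hdrop
      have hgapcase : ∀ (p : Option Int × Option Int) (w : String),
          columns.drop i = p :: columns.drop (i + 1) →
          altStep (spans, none) (((i : Nat) : Int), p) = (spans, some (((i : Nat) : Int), w)) →
          foldSuf columns i (spans, none) =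
            mgsOuter columns (mgsInner columns w (i + 1))
              (spans ++ [(((i : Nat) : Int),
                ((mgsInner columns w (i + 1) : Nat) : Int) - 1, w)]) := by
        intro p w hd hstep
        have h1 : foldSuf columns i (spans, none) =
            foldSuf columns (i + 1) (spans, some (((i : Nat) : Int), w)) := by
          simp only [foldSuf, hd, PySem.List.enumerate_cons, List.foldl_cons, hstep]
          norm_num
        rw [h1, foldSuf_inner columns (columns.length - (i + 1)) (i + 1) _ _ spans le_rfl
          (by omega)]
        have hge := mgsInner_ge columns w (i + 1)
        exact ih _ _ (by omega) (mgsInner_le columns w (i + 1) (by omega))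
      rcases a with _ | x <;> rcases b with _ | y <;>
        simp only [Option.isNone_none, Option.isNone_some, Bool.and_self, Bool.or_self,
          Bool.true_or, Bool.or_true,
          Bool.and_false, Bool.and_true, if_true, if_false, Bool.false_eq_true]
      · exact hgapcase (none, none) "both" hdrop (by simp [altStep, altLabel])
      · exact hgapcase (none, some y) "A" hdrop (by simp [altStep, altLabel])
      · exact hgapcase (some x, none) "B" hdrop (by simp [altStep, altLabel])
      · have hstep : altStep (spans, none) (((i : Nat) : Int), (some x, some y)) =
            (spans, none) := by
          simp [altStep, altLabel]
        have h1 : foldSuf columns i (spans, none) = foldSuf columns (i + 1) (spans, none) := by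
          simp only [foldSuf, hdrop, PySem.List.enumerate_cons, List.foldl_cons, hstep]
          norm_num
        rw [h1]
        exact ih (i + 1) spans (by omega) (by omega)
    · have hi' : i = columns.length := by omega
      subst hi'
      rw [mgsOuter_eq]
      simp [foldSuf]

-- ===== VERDICT (by name: the statement is the Claim_ definition above) =====
theorem merge_gap_spans_spec : Claim_equal_merge_gap_spans := by
  intro columns _
  unfold Spec_merge_gap_spans merge_gap_spans merge_gap_spans_alt
  have h := foldSuf_outer columns columns.length 0 [] (by omega) (by omega)
  simpa [foldSuf] using h.symm
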